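-- pv_equiv track=rewrite | github.com/Wojtek130/Burrows-Wheeler-transform-backward-search | bwt.py | letter_occurences_and_indexed_bwt
-- ===== SOURCE A (Python) =====
-- def letter_occurences_and_indexed_bwt(bwt):
--     letters_count = {}
--     indexed_bwt = []
--     for c in bwt:
--         if c not in letters_count:
--             letters_count[c] = 0
--         indexed_bwt.append((c, letters_count[c]))
--         letters_count[c] += 1
--     return letters_count, indexed_bwt
-- ===== SOURCE B (Python) =====
-- def letter_occurences_and_indexed_bwt(bwt):
--     # Stage 1: one pass building a position index: char -> list of indices
--     # (keys in first-appearance order).  Stage 2: totals are the group sizes,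
--     # and the tags are scattered group-by-group back into their positions.
--     positions = {}
--     for i, c in enumerate(bwt):
--         positions.setdefault(c, []).append(i)
--     letters_count = {c: len(ps) for c, ps in positions.items()}
--     indexed_bwt = [None] * len(bwt)
--     for c, ps in positions.items():
--         for r, p in enumerate(ps):
--             indexed_bwt[p] = (c, r)
--     return letters_count, indexed_bwt
-- ===== Notes on version B (the rewrite author's own statement) =====
-- stated objective: alternative
-- what changed: A interleaves counting and tagging in one pass with a running counter dict; B first builds a position index (char -> list of indices, first-appearance key order), takes the totals as the group sizes, and then scatters (char, rank) pairs group-by-group back into a preallocated output list.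
import Mathlib
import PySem

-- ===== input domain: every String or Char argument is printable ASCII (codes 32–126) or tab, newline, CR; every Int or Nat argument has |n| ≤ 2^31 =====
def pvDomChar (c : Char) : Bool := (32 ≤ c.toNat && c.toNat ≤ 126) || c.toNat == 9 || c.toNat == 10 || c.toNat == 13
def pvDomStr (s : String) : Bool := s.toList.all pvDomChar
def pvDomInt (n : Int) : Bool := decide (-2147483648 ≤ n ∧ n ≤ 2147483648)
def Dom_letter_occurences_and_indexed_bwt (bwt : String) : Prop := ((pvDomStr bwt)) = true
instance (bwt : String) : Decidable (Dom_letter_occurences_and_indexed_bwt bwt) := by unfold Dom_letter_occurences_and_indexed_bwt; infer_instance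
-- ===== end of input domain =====

-- B replaces A's single pass with a running counter dict by a position index
-- (char -> list of indices) from which the totals are the group sizes and the tags
-- are scattered group-by-group back into place (objective: alternative decomposition).

-- ===== PORT A =====
-- A: one forward pass; a running counter dict letters_count, appending (c, count-so-far).
def letter_occurences_and_indexed_bwt (bwt : String) : (List (String × Int)) × (List (String × Int)) :=
  let st := bwt.toList.foldl
    (fun (st : PySem.Dict String Int × List (String × Int)) c =>
      let s := String.ofList [c]
      let lc := if st.1.contains s then st.1 else st.1.insert s 0
      (lc.insert s (lc.getD s 0 + 1), st.2 ++ [(s, lc.getD s 0)]))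
    (PySem.Dict.empty, [])
  (st.1.items, st.2)

-- ===== PORT B =====
-- B: build positions (char -> index list; setdefault(c, []).append(i) is modify with
-- default [] and append), totals = group sizes, then scatter (c, rank) group-by-group.
-- '[None] * len(bwt)' is ported as a replicate of a placeholder: every slot is
-- overwritten before the list is returned, so the placeholder is unobservable.
def letter_occurences_and_indexed_bwt_alt (bwt : String) : (List (String × Int)) × (List (String × Int)) :=
  let chars := bwt.toList
  let positions := (PySem.List.enumerate chars).foldl
    (fun (d : PySem.Dict String (List Int)) ic =>
      d.modify (String.ofList [ic.2]) [] (· ++ [ic.1]))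
    PySem.Dict.empty
  let letters_count := positions.items.map (fun kv => (kv.1, (kv.2.length : Int)))
  let indexed_bwt := positions.items.foldl
    (fun acc kv =>
      (PySem.List.enumerate kv.2).foldl
        (fun acc rp => PySem.List.pySetD acc rp.2 (kv.1, rp.1)) acc)
    (List.replicate chars.length ("", -1))
  (letters_count, indexed_bwt)

-- ===== PRECONDITION & SPEC =====
def Spec_letter_occurences_and_indexed_bwt (bwt : String) (out : (List (String × Int)) × (List (String × Int))) : Prop := out = letter_occurences_and_indexed_bwt_alt bwt
instance (bwt : String) (out : (List (String × Int)) × (List (String × Int))) : Decidable (Spec_letter_occurences_and_indexed_bwt bwt out) := by unfold Spec_letter_occurences_and_indexed_bwt; infer_instance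

-- ===== CLAIM (what is proved, stated in full; the proofs are below) =====
def Claim_equal_letter_occurences_and_indexed_bwt : Prop := ∀ (bwt : String), Dom_letter_occurences_and_indexed_bwt bwt → Spec_letter_occurences_and_indexed_bwt bwt (letter_occurences_and_indexed_bwt bwt)

-- ===== LEMMAS AND PROOFS =====

theorem pvKey_inj {a b : Char} (h : String.ofList [a] = String.ofList [b]) : a = b := by
  have := congrArg String.toList h
  simpa using this

theorem pvKey_injective : Function.Injective (fun c : Char => String.ofList [c]) :=
  fun _ _ h => pvKey_inj h

-- the common tag list: entry for each position = (one-char key, count of the char in the strict prefix)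
def pvTags (p : List Char) : List Char → List (String × Int)
  | [] => []
  | c :: rest => (String.ofList [c], (p.count c : Int)) :: pvTags (p ++ [c]) rest

-- A's loop, characterized
theorem pvA_loop (rest : List Char) : ∀ (p : List Char) (d : PySem.Dict String Int)
    (acc : List (String × Int)),
    (∀ c, d.getD (String.ofList [c]) 0 = (p.count c : Int)) →
    rest.foldl
      (fun (st : PySem.Dict String Int × List (String × Int)) c =>
        let s := String.ofList [c]
        let lc := if st.1.contains s then st.1 else st.1.insert s 0
        (lc.insert s (lc.getD s 0 + 1), st.2 ++ [(s, lc.getD s 0)]))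
      (d, acc)
    = (rest.foldl (fun d c => d.insert (String.ofList [c]) (d.getD (String.ofList [c]) 0 + 1)) d,
       acc ++ pvTags p rest) := by
  induction rest with
  | nil => intro p d acc _; simp [pvTags]
  | cons c rest ih =>
      intro p d acc hinv
      have hstep : (if d.contains (String.ofList [c]) then d else d.insert (String.ofList [c]) 0).insert (String.ofList [c])
            ((if d.contains (String.ofList [c]) then d else d.insert (String.ofList [c]) 0).getD (String.ofList [c]) 0 + 1)
          = d.insert (String.ofList [c]) (d.getD (String.ofList [c]) 0 + 1) := by
        by_cases h : d.contains (String.ofList [c]) = true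
        · rw [if_pos h]
        · rw [if_neg h, PySem.Dict.getD_insert_self, PySem.Dict.insert_insert_self,
            PySem.Dict.getD_of_not_contains d 0 (by simpa using h)]
      have hval : (if d.contains (String.ofList [c]) then d else d.insert (String.ofList [c]) 0).getD (String.ofList [c]) 0
          = d.getD (String.ofList [c]) 0 := by
        by_cases h : d.contains (String.ofList [c]) = true
        · rw [if_pos h]
        · rw [if_neg h, PySem.Dict.getD_insert_self,
            PySem.Dict.getD_of_not_contains d 0 (by simpa using h)]
      have hinv' : ∀ c', (d.insert (String.ofList [c]) (d.getD (String.ofList [c]) 0 + 1)).getD (String.ofList [c']) 0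
          = ((p ++ [c]).count c' : Int) := by
        intro c'
        by_cases hc : c' = c
        · subst hc
          rw [PySem.Dict.getD_insert_self, hinv c']
          simp [List.count_append]
        · have hne : String.ofList [c'] ≠ String.ofList [c] := fun h => hc (pvKey_inj h)
          rw [PySem.Dict.getD_insert_of_ne d _ _ hne, hinv c']
          simp [List.count_append, List.count_singleton]
          exact fun h => hc h.symm
      simp only [List.foldl_cons]
      show rest.foldl _
        ((if d.contains (String.ofList [c]) then d else d.insert (String.ofList [c]) 0).insert (String.ofList [c]) _,
         acc ++ [(String.ofList [c],
           (if d.contains (String.ofList [c]) then d else d.insert (String.ofList [c]) 0).getD (String.ofList [c]) 0)]) = _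
      rw [hstep, hval,
        ih (p ++ [c]) (d.insert (String.ofList [c]) (d.getD (String.ofList [c]) 0 + 1))
          (acc ++ [(String.ofList [c], d.getD (String.ofList [c]) 0)]) hinv']
      simp [pvTags, hinv c]

-- pvTags as a map over enumerate: tag at index i = (key, count in the strict prefix)
theorem pvTags_enumerate (rest : List Char) : ∀ (p : List Char),
    pvTags p rest
      = (PySem.List.enumerate rest (p.length : Int)).map
          (fun ic => (String.ofList [ic.2], (((p ++ rest).take ic.1.toNat).count ic.2 : Int))) := by
  induction rest with
  | nil => intro p; simp [pvTags, PySem.List.enumerate_nil]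
  | cons c rest ih =>
      intro p
      rw [pvTags, PySem.List.enumerate_cons, List.map_cons]
      have hhead : ((p ++ c :: rest).take ((p.length : Int)).toNat).count c = p.count c := by
        simp
      have hlen : (p.length : Int) + 1 = ((p ++ [c]).length : Int) := by
        simp
      have htail : (PySem.List.enumerate rest ((p.length : Int) + 1)).map
            (fun ic => (String.ofList [ic.2], (((p ++ c :: rest).take ic.1.toNat).count ic.2 : Int)))
          = (PySem.List.enumerate rest (((p ++ [c]).length : Int))).map
            (fun ic => (String.ofList [ic.2], ((((p ++ [c]) ++ rest).take ic.1.toNat).count ic.2 : Int))) := by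
        rw [hlen]
        simp
      rw [hhead, htail, ← ih (p ++ [c])]

-- Set.ofList commutes with the injective one-char-string map
theorem pvOfList_map_aux (l : List Char) : ∀ (s : List Char),
    l.foldl (fun s c => PySem.Set.add s (String.ofList [c])) (s.map (fun c => String.ofList [c]))
      = (l.foldl (fun s c => PySem.Set.add s c) s).map (fun c => String.ofList [c]) := by
  induction l with
  | nil => intro s; simp
  | cons c l ih =>
      intro s
      have hmem : String.ofList [c] ∈ s.map (fun c => String.ofList [c]) ↔ c ∈ s := by
        constructor
        · intro h
          obtain ⟨a, ha, hk⟩ := List.mem_map.mp h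
          exact (pvKey_inj hk) ▸ ha
        · intro h; exact List.mem_map.mpr ⟨c, h, rfl⟩
      have hadd : PySem.Set.add (s.map (fun c => String.ofList [c])) (String.ofList [c])
          = (PySem.Set.add s c).map (fun c => String.ofList [c]) := by
        rw [PySem.Set.add_eq_ite, PySem.Set.add_eq_ite]
        by_cases h : c ∈ s
        · simp [h, hmem.mpr h]
        · simp [h, hmem]
      simp only [List.foldl_cons, hadd, ih]

theorem pvSet_ofList_map (l : List Char) :
    PySem.Set.ofList (l.map (fun c => String.ofList [c]))
      = (PySem.Set.ofList l).map (fun c => String.ofList [c]) := by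
  rw [PySem.Set.ofList_eq_foldl, PySem.Set.ofList_eq_foldl, List.foldl_map]
  simpa using pvOfList_map_aux l []

-- A's final dict items = (dedup, count) pairs
theorem pvDict_items (l : List Char) :
    (l.foldl (fun d c => d.insert (String.ofList [c]) (d.getD (String.ofList [c]) 0 + 1))
      (PySem.Dict.empty : PySem.Dict String Int)).items
    = (PySem.List.dedup l).map (fun c => (String.ofList [c], (l.count c : Int))) := by
  have h1 : l.foldl (fun d c => d.insert (String.ofList [c]) (d.getD (String.ofList [c]) 0 + 1))
      (PySem.Dict.empty : PySem.Dict String Int)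
      = PySem.Dict.counter (l.map (fun c => String.ofList [c])) := by
    rw [← PySem.Dict.foldl_insert_getD_add_one_eq_counter, List.foldl_map]
  rw [h1, PySem.Dict.items_counter, pvSet_ofList_map, PySem.List.dedup_eq_ofList,
    List.map_map]
  apply List.map_congr_left
  intro c _
  simp [List.count_map_of_injective _ _ pvKey_injective]

-- ---- B side: the position index ----

-- the index list of c in l, indices starting at s
def pvPos (l : List Char) (s : Int) (c : Char) : List Int :=
  ((PySem.List.enumerate l s).filter (fun ic => ic.2 == c)).map (fun ic => ic.1)

theorem pvPos_nil (s : Int) (c : Char) : pvPos [] s c = [] := by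
  simp [pvPos, PySem.List.enumerate_nil]

theorem pvPos_cons (x : Char) (xs : List Char) (s : Int) (c : Char) :
    pvPos (x :: xs) s c = (if x == c then [s] else []) ++ pvPos xs (s + 1) c := by
  by_cases h : x = c
  · simp [pvPos, PySem.List.enumerate_cons, h]
  · simp [pvPos, PySem.List.enumerate_cons, h]

theorem pvPos_length (l : List Char) : ∀ (s : Int) (c : Char),
    (pvPos l s c).length = l.count c := by
  induction l with
  | nil => intro s c; simp [pvPos_nil]
  | cons x xs ih =>
      intro s c
      rw [pvPos_cons, List.length_append, ih (s + 1) c, List.count_cons]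
      by_cases h : x = c
      · simp [h]
        omega
      · simp [h]

theorem pvPos_mem (l : List Char) (s : Int) (c : Char) {x : Int} (hx : x ∈ pvPos l s c) :
    ∃ (k : Nat) (h : k < l.length), x = s + (k : Int) ∧ l[k] = c := by
  obtain ⟨ic, hic, rfl⟩ := List.mem_map.mp hx
  have h2 := List.mem_filter.mp hic
  obtain ⟨k, hk, rfl⟩ := (PySem.List.mem_enumerate_iff _ _ _).mp h2.1
  exact ⟨k, hk, rfl, by simpa using h2.2⟩

theorem pvPos_pairwise (l : List Char) (s : Int) (c : Char) :
    (pvPos l s c).Pairwise (· < ·) := by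
  apply List.pairwise_map.mpr
  exact (PySem.List.pairwise_lt_enumerate l s).filter _

-- completeness with the rank: position j of letter c sits at index (take j).count c
theorem pvPos_rank' (l : List Char) : ∀ (s : Int) (c : Char) (j : Nat) (hj : j < l.length),
    l[j] = c → (pvPos l s c)[(l.take j).count c]? = some (s + (j : Int)) := by
  induction l with
  | nil => intro s c j hj; simp at hj
  | cons x xs ih =>
      intro s c j hj hc
      cases j with
      | zero =>
          simp only [List.getElem_cons_zero] at hc
          subst hc
          simp [pvPos_cons]
      | succ j =>
          simp only [List.getElem_cons_succ] at hc
          have hj' : j < xs.length := by simpa using hj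
          have iht := ih (s + 1) c j hj' hc
          rw [pvPos_cons]
          by_cases h : x = c
          · subst h
            simp only [beq_self_eq_true, if_true, List.take_succ_cons, List.count_cons_self,
              List.singleton_append, List.getElem?_cons_succ]
            rw [iht]
            congr 1
            push_cast
            omega
          · have hb : (x == c) = false := by simp [h]
            rw [hb]
            simp only [Bool.false_eq_true, if_false, List.nil_append, List.take_succ_cons]
            have hcnt : (x :: xs.take j).count c = (xs.take j).count c := by
              simp [h]
            rw [hcnt, iht]
            congr 1
            push_cast
            omega

-- inner scatter: length is preserved
theorem pvInner_length (ps : List Int) : ∀ (r : Int) (ks : String) (acc : List (String × Int)),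
    ((PySem.List.enumerate ps r).foldl
      (fun acc rp => PySem.List.pySetD acc rp.2 (ks, rp.1)) acc).length = acc.length := by
  induction ps with
  | nil => intro r ks acc; simp [PySem.List.enumerate_nil]
  | cons p ps ih =>
      intro r ks acc
      rw [PySem.List.enumerate_cons, List.foldl_cons, ih]
      exact PySem.List.length_pySetD _ _ _

-- inner scatter leaves untouched slots alone
theorem pvInner_untouched (ps : List Int) : ∀ (r : Int) (ks : String) (acc : List (String × Int)) (j : Nat),
    (∀ p ∈ ps, ∃ k : Nat, p = (k : Int)) → (∀ p ∈ ps, p ≠ (j : Int)) →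
    ((PySem.List.enumerate ps r).foldl
      (fun acc rp => PySem.List.pySetD acc rp.2 (ks, rp.1)) acc)[j]? = acc[j]? := by
  induction ps with
  | nil => intro r ks acc j _ _; simp [PySem.List.enumerate_nil]
  | cons p ps ih =>
      intro r ks acc j hnn hne
      obtain ⟨k, rfl⟩ := hnn p (by simp)
      have hkj : k ≠ j := by
        intro h
        exact hne ((k : Int)) (by simp) (by exact_mod_cast h)
      rw [PySem.List.enumerate_cons, List.foldl_cons]
      simp only [PySem.List.pySetD_natCast]
      rw [ih (r + 1) ks _ j (fun p hp => hnn p (by simp [hp])) (fun p hp => hne p (by simp [hp]))]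
      exact List.getElem?_set_ne hkj

-- inner scatter writes (ks, r + rank) at the position stored at that rank
theorem pvInner_hit (ps : List Int) : ∀ (t : Nat) (r : Int) (ks : String)
    (acc : List (String × Int)) (j : Nat),
    ps.Pairwise (· < ·) → (∀ p ∈ ps, ∃ k : Nat, p = (k : Int) ∧ k < acc.length) →
    ps[t]? = some (j : Int) →
    ((PySem.List.enumerate ps r).foldl
      (fun acc rp => PySem.List.pySetD acc rp.2 (ks, rp.1)) acc)[j]? = some (ks, r + (t : Int)) := by
  induction ps with
  | nil => intro t r ks acc j _ _ h; simp at h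
  | cons p ps ih =>
      intro t r ks acc j hpw hin ht
      rw [PySem.List.enumerate_cons, List.foldl_cons]
      cases t with
      | zero =>
          simp only [List.getElem?_cons_zero, Option.some_inj] at ht
          subst ht
          simp only [PySem.List.pySetD_natCast]
          have hlen : j < acc.length := by
            obtain ⟨k, hk, hkl⟩ := hin ((j : Int)) (by simp)
            have hkj : k = j := by exact_mod_cast hk.symm
            omega
          rw [pvInner_untouched ps (r + 1) ks _ j
            (fun q hq => by
              obtain ⟨k, hk, _⟩ := hin q (by simp [hq]); exact ⟨k, hk⟩)
            (fun q hq => by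
              have : (j : Int) < q := (List.pairwise_cons.mp hpw).1 q hq
              omega)]
          rw [List.getElem?_set_self (by simpa using hlen)]
          simp
      | succ t =>
          simp only [List.getElem?_cons_succ] at ht
          obtain ⟨k, hk, hkl⟩ := hin p (by simp)
          subst hk
          simp only [PySem.List.pySetD_natCast]
          have := ih t (r + 1) ks (acc.set k (ks, r)) j
            (List.pairwise_cons.mp hpw).2
            (fun q hq => by
              obtain ⟨m, hm, hml⟩ := hin q (by simp [hq])
              exact ⟨m, hm, by simpa using hml⟩)
            ht
          rw [this]
          congr 2
          push_cast
          ring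

-- outer scatter: length is preserved
theorem pvOuter_length (l : List Char) (cs : List Char) : ∀ (acc : List (String × Int)),
    (cs.foldl (fun acc c =>
      (PySem.List.enumerate (pvPos l 0 c)).foldl
        (fun acc rp => PySem.List.pySetD acc rp.2 (String.ofList [c], rp.1)) acc) acc).length
    = acc.length := by
  induction cs with
  | nil => intro acc; simp
  | cons c cs ih =>
      intro acc
      rw [List.foldl_cons, ih, pvInner_length]

-- outer scatter over groups: processed letters carry their tag
theorem pvOuter (l : List Char) (cs : List Char) : ∀ (acc : List (String × Int)),
    acc.length = l.length → ∀ (j : Nat) (hj : j < l.length),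
    (cs.foldl (fun acc c =>
      (PySem.List.enumerate (pvPos l 0 c)).foldl
        (fun acc rp => PySem.List.pySetD acc rp.2 (String.ofList [c], rp.1)) acc) acc)[j]?
    = if l[j] ∈ cs then some (String.ofList [l[j]], ((l.take j).count l[j] : Int)) else acc[j]? := by
  induction cs with
  | nil => intro acc _ j hj; simp
  | cons c cs ih =>
      intro acc hlen j hj
      rw [List.foldl_cons]
      have hlen1 : ((PySem.List.enumerate (pvPos l 0 c)).foldl
          (fun acc rp => PySem.List.pySetD acc rp.2 (String.ofList [c], rp.1)) acc).length
          = l.length := by rw [pvInner_length]; exact hlen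
      rw [ih _ hlen1 j hj]
      by_cases hm : l[j] ∈ cs
      · simp [hm]
      · rw [if_neg hm]
        by_cases hc : l[j] = c
        · rw [if_pos (by simp [hc])]
          have ht := pvPos_rank' l 0 c j hj hc
          simp only [zero_add] at ht
          rw [pvInner_hit (pvPos l 0 c) ((l.take j).count c) 0 (String.ofList [c]) acc j
            (pvPos_pairwise l 0 c)
            (fun p hp => by
              obtain ⟨k, hk, hkx, _⟩ := pvPos_mem l 0 c hp
              exact ⟨k, by simpa using hkx, by rw [hlen]; exact hk⟩)
            ht]
          rw [hc]
          simp
        · rw [if_neg (by simp [hc, hm])]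
          apply pvInner_untouched
          · intro p hp
            obtain ⟨k, _, hkx, _⟩ := pvPos_mem l 0 c hp
            exact ⟨k, by simpa using hkx⟩
          · intro p hp hpj
            obtain ⟨k, hk, hkx, hkc⟩ := pvPos_mem l 0 c hp
            apply hc
            have hkj : k = j := by omega
            subst hkj
            exact hkc

-- the positions dict, characterized
theorem pvPositions_getD (l : List Char) (c : Char) :
    ((PySem.List.enumerate l).foldl
      (fun (d : PySem.Dict String (List Int)) ic =>
        d.modify (String.ofList [ic.2]) [] (· ++ [ic.1])) PySem.Dict.empty).getD
      (String.ofList [c]) [] = pvPos l 0 c := by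
  have h1 : (PySem.List.enumerate l).foldl
      (fun (d : PySem.Dict String (List Int)) ic =>
        d.modify (String.ofList [ic.2]) [] (· ++ [ic.1])) PySem.Dict.empty
      = ((PySem.List.enumerate l).map (fun ic => (String.ofList [ic.2], ic.1))).foldl
        (fun d p => d.modify p.1 [] (· ++ [p.2])) PySem.Dict.empty := by
    rw [List.foldl_map]
  rw [h1, PySem.Dict.getD_foldl_modify_append, PySem.Dict.getD_empty, List.filter_map,
    List.map_map, List.nil_append]
  have hpred : ((fun p : String × Int => p.1 == String.ofList [c])
        ∘ (fun ic : Int × Char => (String.ofList [ic.2], ic.1)))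
      = (fun ic : Int × Char => ic.2 == c) := by
    funext ic
    show (String.ofList [ic.2] == String.ofList [c]) = (ic.2 == c)
    by_cases h : ic.2 = c
    · simp [h]
    · have hne : String.ofList [ic.2] ≠ String.ofList [c] := fun hh => h (pvKey_inj hh)
      simp [h, hne]
  rw [hpred]
  rfl

theorem pvPositions_items (l : List Char) :
    ((PySem.List.enumerate l).foldl
      (fun (d : PySem.Dict String (List Int)) ic =>
        d.modify (String.ofList [ic.2]) [] (· ++ [ic.1])) PySem.Dict.empty).items
    = (PySem.List.dedup l).map (fun c => (String.ofList [c], pvPos l 0 c)) := by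
  set D := (PySem.List.enumerate l).foldl
      (fun (d : PySem.Dict String (List Int)) ic =>
        d.modify (String.ofList [ic.2]) [] (· ++ [ic.1])) PySem.Dict.empty with hD
  have hkeys : D.keys = (PySem.List.dedup l).map (fun c => String.ofList [c]) := by
    rw [hD]
    rw [show (fun (d : PySem.Dict String (List Int)) ic =>
        d.modify (String.ofList [ic.2]) [] (· ++ [ic.1]))
      = (fun (d : PySem.Dict String (List Int)) (ic : Int × Char) =>
        d.modify ((fun ic : Int × Char => String.ofList [ic.2]) ic) []
          ((fun (_ : PySem.Dict String (List Int)) (ic : Int × Char) => (· ++ [ic.1])) d ic)) from rfl]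
    rw [PySem.Dict.keys_foldl_modify_key, PySem.Dict.keys_empty, PySem.Set.update_nil_left]
    have : (PySem.List.enumerate l).map (fun ic => String.ofList [ic.2])
        = l.map (fun c => String.ofList [c]) := by
      rw [show (fun ic : Int × Char => String.ofList [ic.2])
        = (fun c : Char => String.ofList [c]) ∘ (fun ic : Int × Char => ic.2) from rfl]
      rw [← List.map_map, PySem.List.map_snd_enumerate]
    rw [this, pvSet_ofList_map, PySem.List.dedup_eq_ofList]
  have hnodup : D.keys.Nodup := by
    rw [hD]
    rw [show (fun (d : PySem.Dict String (List Int)) ic =>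
        d.modify (String.ofList [ic.2]) [] (· ++ [ic.1]))
      = (fun (d : PySem.Dict String (List Int)) (ic : Int × Char) =>
        d.modify ((fun ic : Int × Char => String.ofList [ic.2]) ic) []
          ((fun (_ : PySem.Dict String (List Int)) (ic : Int × Char) => (· ++ [ic.1])) d ic)) from rfl]
    exact PySem.Dict.nodup_keys_foldl_modify_key _ _ _ _ _ PySem.Dict.nodup_keys_empty
  rw [PySem.Dict.items_eq_map_keys D hnodup [], hkeys, List.map_map]
  apply List.map_congr_left
  intro c _
  simp only [Function.comp_apply]
  rw [pvPositions_getD]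

-- ===== VERDICT (by name: the statement is the Claim_ definition above) =====
theorem letter_occurences_and_indexed_bwt_spec : Claim_equal_letter_occurences_and_indexed_bwt := by
  intro bwt _
  unfold Spec_letter_occurences_and_indexed_bwt
  simp only [letter_occurences_and_indexed_bwt, letter_occurences_and_indexed_bwt_alt]
  have hA := pvA_loop bwt.toList [] (PySem.Dict.empty : PySem.Dict String Int) []
    (by intro c; simp)
  simp only [List.nil_append] at hA
  rw [hA]
  set l := bwt.toList
  rw [pvPositions_items l]
  refine Prod.ext ?_ ?_
  · show (l.foldl _ PySem.Dict.empty).items = _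
    rw [pvDict_items l, List.map_map]
    apply List.map_congr_left
    intro c _
    simp only [Function.comp_apply]
    rw [pvPos_length]
  · show pvTags [] l = _
    rw [List.foldl_map]
    apply List.ext_getElem?
    intro j
    by_cases hj : j < l.length
    · rw [pvOuter l (PySem.List.dedup l) _ (by simp) j hj,
        if_pos ((PySem.List.mem_dedup l _).mpr (List.getElem_mem hj))]
      rw [pvTags_enumerate l []]
      simp only [List.length_nil, Nat.cast_zero, List.nil_append]
      rw [List.getElem?_map, PySem.List.getElem?_enumerate]
      rw [List.getElem?_eq_getElem hj]
      simp
    · have h1 : (pvTags [] l).length = l.length := by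
        rw [pvTags_enumerate l []]
        simp [PySem.List.length_enumerate]
      have h2 := pvOuter_length l (PySem.List.dedup l)
        (List.replicate l.length (("" : String), (-1 : Int)))
      rw [List.getElem?_eq_none (by omega), List.getElem?_eq_none (by
        rw [h2]; simp; omega)]
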